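-- pv_equiv track=rewrite | github.com/kevin9768/Python_Startup | HW5/HW5_1_prog.py | v_diagonal
-- ===== SOURCE A (Python) =====
-- def v_diagonal(a):
--     t = 0
--     for i in range(-3, 4):
--         t = 0
--         for j in range(0, 5):
--             if i+j<0 or i+j>4:
--                 continue
--             t += a[j][i+j]
--         if t > 1:
--             return False
--     for i in range(1, 8):
--         t = 0
--         for j in range(0, 5):
--             if i-j<0 or i-j>4:
--                 continue
--             t += a[j][i-j]
--         if t > 1:
--             return False
--
--     return True
-- ===== SOURCE B (Python) =====
-- def v_diagonal(a):
--     main = {}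
--     anti = {}
--     for j in range(5):
--         for c, v in enumerate(a[j][:5]):
--             main[c - j] = main.get(c - j, 0) + v
--             anti[c + j] = anti.get(c + j, 0) + v
--     for k in range(-3, 4):
--         if main.get(k, 0) > 1:
--             return False
--     for k in range(1, 8):
--         if anti.get(k, 0) > 1:
--             return False
--     return True
-- ===== Notes on version B (the rewrite author's own statement) =====
-- stated objective: alternative
-- what changed: B makes a single pass over the grid cells, bucketing each value into two dicts keyed by diagonal index (col-row and col+row), then checks the relevant keys, instead of A's per-diagonal offset-indexed rescans of the grid.
import Mathlib
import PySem

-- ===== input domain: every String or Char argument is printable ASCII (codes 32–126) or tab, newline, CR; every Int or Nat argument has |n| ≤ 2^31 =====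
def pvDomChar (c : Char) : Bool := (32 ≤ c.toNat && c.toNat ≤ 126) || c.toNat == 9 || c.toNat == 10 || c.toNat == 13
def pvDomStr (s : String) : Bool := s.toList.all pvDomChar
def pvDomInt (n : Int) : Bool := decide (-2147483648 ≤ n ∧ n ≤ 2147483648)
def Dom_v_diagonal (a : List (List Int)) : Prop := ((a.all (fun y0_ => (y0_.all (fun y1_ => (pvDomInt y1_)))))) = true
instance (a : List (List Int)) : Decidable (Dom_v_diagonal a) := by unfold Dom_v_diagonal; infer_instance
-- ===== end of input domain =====

-- B replaces A's per-diagonal offset-indexed rescans with one pass over the cells that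
-- buckets values into two diagonal-keyed dicts, then checks the relevant keys (objective: alternative).

-- ===== PORT A =====
-- a[j][c] (indices nonnegative; under Pre_ the row exists, and missing cells are only reached
-- where the Python would raise — the default is exact wherever the Python A returns)
def pvCell (a : List (List Int)) (j c : Int) : Int :=
  PySem.List.pyGetD (PySem.List.pyGetD a j []) c 0

def v_diagonal (a : List (List Int)) : Bool :=
  -- each loop with its early 'return False' is an any; t is reset at each i so the trailing t is dead
  if (PySem.List.pyRange (-3) 4 1).any (fun i =>
      ((PySem.List.pyRange 0 5 1).foldl (fun t j =>
          if i + j < 0 ∨ i + j > 4 then t else t + pvCell a j (i + j)) 0) > 1)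
  then false
  else if (PySem.List.pyRange 1 8 1).any (fun i =>
      ((PySem.List.pyRange 0 5 1).foldl (fun t j =>
          if i - j < 0 ∨ i - j > 4 then t else t + pvCell a j (i - j)) 0) > 1)
  then false
  else true

-- ===== PORT B =====
def v_diagonal_alt (a : List (List Int)) : Bool :=
  let p := (PySem.List.pyRange 0 5 1).foldl
    (fun (q : PySem.Dict Int Int × PySem.Dict Int Int) j =>
      (PySem.List.enumerate (PySem.List.slice (PySem.List.pyGetD a j []) none (some 5)) 0).foldl
        (fun (q : PySem.Dict Int Int × PySem.Dict Int Int) cv =>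
          (q.1.insert (cv.1 - j) (q.1.getD (cv.1 - j) 0 + cv.2),
           q.2.insert (cv.1 + j) (q.2.getD (cv.1 + j) 0 + cv.2))) q)
    (PySem.Dict.empty, PySem.Dict.empty)
  -- the checking loops with early 'return False' are anys
  if (PySem.List.pyRange (-3) 4 1).any (fun k => p.1.getD k 0 > 1) then false
  else if (PySem.List.pyRange 1 8 1).any (fun k => p.2.getD k 0 > 1) then false
  else true

-- ===== PRECONDITION & SPEC =====
-- Pre_ admits exactly inputs on which A is known to return: grids with 5 full-length first rows
-- (A never raises there), or grids with at least 5 rows whose FIRST diagonal a[3][0]+a[4][1]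
-- already sums > 1 (A returns False before reading any other cell). Grids with fewer than 5 rows
-- always raise IndexError. Excluded but returning: ragged grids whose early 'return False' fires
-- only at a later diagonal — whether A returns there depends on its scan order, which a
-- closed-form precondition cannot state without simulating the loop (see cites; A and B agree there too).
def Pre_v_diagonal (a : List (List Int)) : Prop :=
  5 ≤ a.length ∧
    ((∀ r ∈ a.take 5, 5 ≤ r.length) ∨
      (1 ≤ (a.getD 3 []).length ∧ 2 ≤ (a.getD 4 []).length ∧
        1 < (a.getD 3 []).getD 0 0 + (a.getD 4 []).getD 1 0))
instance (a : List (List Int)) : Decidable (Pre_v_diagonal a) := by unfold Pre_v_diagonal; infer_instance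

def pvWitness_v_diagonal : List (List Int) :=
  [[1,0,0,0,0],[0,0,0,0,0],[0,0,0,1,0],[0,0,0,0,0],[0,0,0,0,1]]

def Spec_v_diagonal (a : List (List Int)) (out : Bool) : Prop := out = v_diagonal_alt a
instance (a : List (List Int)) (out : Bool) : Decidable (Spec_v_diagonal a out) := by unfold Spec_v_diagonal; infer_instance

-- ===== CLAIM (what is proved, stated in full; the proofs are below) =====
def Claim_equal_v_diagonal : Prop := ∀ (a : List (List Int)), Dom_v_diagonal a → Pre_v_diagonal a → Spec_v_diagonal a (v_diagonal a)

-- ===== LEMMAS AND PROOFS =====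

-- one diagonal step: skip out-of-range columns, otherwise add the cell (0 if the row is short)
def pvB (row : List Int) (c0 t : Int) : Int :=
  if c0 < 0 ∨ c0 > 4 then t else t + PySem.List.pyGetD row c0 0

def pvMainS (r0 r1 r2 r3 r4 : List Int) (k : Int) : Int :=
  pvB r4 (k+4) (pvB r3 (k+3) (pvB r2 (k+2) (pvB r1 (k+1) (pvB r0 (k+0) 0))))

def pvAntiS (r0 r1 r2 r3 r4 : List Int) (k : Int) : Int :=
  pvB r4 (k-4) (pvB r3 (k-3) (pvB r2 (k-2) (pvB r1 (k-1) (pvB r0 (k-0) 0))))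

def pvOut (r0 r1 r2 r3 r4 : List Int) : Bool :=
  if (PySem.List.pyRange (-3) 4 1).any (fun k => pvMainS r0 r1 r2 r3 r4 k > 1) then false
  else if (PySem.List.pyRange 1 8 1).any (fun k => pvAntiS r0 r1 r2 r3 r4 k > 1) then false
  else true

-- Python indexing: positive index into a cons steps into the tail
theorem pvGetDConsPos {α : Type} (y : α) (ys : List α) (i : Int) (d : α) (h : 0 < i) :
    PySem.List.pyGetD (y :: ys) i d = PySem.List.pyGetD ys (i - 1) d := by
  simp only [PySem.List.pyGetD, PySem.List.pyGet?, PySem.List.pyIdx?, List.length_cons]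
  rw [if_pos (by omega : (0:Int) ≤ i), if_pos (by omega : (0:Int) ≤ i - 1)]
  by_cases hlt : i < ((ys.length : Int) + 1)
  · rw [if_pos (by omega), if_pos (by omega)]
    have hn : i.toNat = (i - 1).toNat + 1 := by omega
    rw [Option.bind_some, Option.bind_some, hn, List.getElem?_cons_succ]
  · rw [if_neg (by omega), if_neg (by omega)]
    rfl

-- Python indexing: a too-large index yields the default
theorem pvGetDOut {α : Type} (xs : List α) (i : Int) (d : α) (h0 : 0 ≤ i)
    (h : (xs.length : Int) ≤ i) : PySem.List.pyGetD xs i d = d := by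
  simp only [PySem.List.pyGetD, PySem.List.pyGet?, PySem.List.pyIdx?]
  rw [if_pos h0, if_neg (by omega)]
  rfl

-- filtering an enumeration for one index keeps at most that one cell
theorem pvEnumFilter (ys : List Int) (s c0 : Int) :
    (PySem.List.enumerate ys s).filter (fun cv => cv.1 == c0)
      = if s ≤ c0 ∧ c0 < s + ys.length then [(c0, PySem.List.pyGetD ys (c0 - s) 0)] else [] := by
  induction ys generalizing s with
  | nil =>
      rw [if_neg (by simp only [List.length_nil, Nat.cast_zero]; omega)]
      simp [PySem.List.enumerate_nil]
  | cons y ys ih =>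
      rw [PySem.List.enumerate_cons, List.filter_cons, ih (s + 1)]
      by_cases h : s = c0
      · subst h
        rw [if_pos (beq_self_eq_true s),
            if_neg (by omega),
            if_pos (by simp only [List.length_cons]; push_cast; omega)]
        simp [PySem.List.pyGetD_zero_cons]
      · rw [if_neg (by simpa using h)]
        by_cases hc : s + 1 ≤ c0 ∧ c0 < s + 1 + (ys.length : Int)
        · rw [if_pos hc, if_pos (by simp only [List.length_cons] at hc ⊢; push_cast at hc ⊢; omega)]
          rw [pvGetDConsPos _ _ _ _ (by omega)]
          have he : c0 - s - 1 = c0 - (s + 1) := by omega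
          rw [he]
        · rw [if_neg hc, if_neg (by simp only [List.length_cons] at hc ⊢; push_cast at hc ⊢; omega)]

-- one row's contribution to one diagonal bucket
theorem pvRowBlock (row : List Int) (q : Int × Int → Bool) (c0 t0 : Int)
    (hq : ∀ cv : Int × Int, q cv = (cv.1 == c0)) :
    ((PySem.List.enumerate (PySem.List.slice row none (some 5)) 0).filter q).foldl
        (fun t cv => t + cv.2) t0
      = pvB row c0 t0 := by
  rw [List.filter_congr (fun cv _ => hq cv),
      PySem.List.slice_to row (by norm_num : (0:Int) ≤ 5), pvEnumFilter]
  have hlen : ((row.take (5:Int).toNat).length : Int) = min 5 (row.length : Int) := by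
    simp [List.length_take]
  unfold pvB
  by_cases h : (0:Int) ≤ c0 ∧ c0 < 0 + ((row.take (5:Int).toNat).length : Int)
  · rw [if_pos h, if_neg (by rw [hlen] at h; omega)]
    have hr : c0 < (row.length : Int) := by rw [hlen] at h; omega
    simp only [List.foldl_cons, List.foldl_nil]
    rw [PySem.List.pyGetD_eq_getElem _ _ (by omega) (by omega : c0 - 0 < ((row.take (5:Int).toNat).length : Int)),
        PySem.List.pyGetD_eq_getElem _ _ (by omega) hr]
    have hidx : (c0 - 0).toNat = c0.toNat := by omega
    simp only [hidx, List.getElem_take]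
  · rw [if_neg h, List.foldl_nil]
    by_cases hc : c0 < 0 ∨ c0 > 4
    · rw [if_pos hc]
    · rw [if_neg hc]
      rw [pvGetDOut _ _ _ (by omega) (by rw [hlen] at h; omega)]
      omega

-- a nested loop updating the two dict components independently is a pair of nested loops
theorem pvFoldSplit {α β ι κ : Type} (F : α → ι → κ → α) (G : β → ι → κ → β)
    (R : List ι) (M : ι → List κ) (x : α) (y : β) :
    R.foldl (fun p j => (M j).foldl (fun q c => (F q.1 j c, G q.2 j c)) p) (x, y)
      = (R.foldl (fun d j => (M j).foldl (fun d c => F d j c) d) x,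
         R.foldl (fun d j => (M j).foldl (fun d c => G d j c) d) y) := by
  induction R generalizing x y with
  | nil => rfl
  | cons j js ih =>
      simp only [List.foldl_cons]
      rw [PySem.List.foldl_prod_mk (f := fun d c => F d j c) (g := fun d c => G d j c)]
      exact ih _ _

-- a nested loop over rows and their cells is a loop over the (row, cell) pairs
theorem pvFoldFlat {δ ι κ : Type} (f : δ → ι × κ → δ) (R : List ι) (M : ι → List κ) (z : δ) :
    R.foldl (fun d j => (M j).foldl (fun d c => f d (j, c)) d) z
      = (R.flatMap (fun j => (M j).map (fun c => (j, c)))).foldl f z := by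
  induction R generalizing z with
  | nil => rfl
  | cons j js ih =>
      simp only [List.flatMap_cons, List.foldl_append, List.foldl_cons, List.foldl_map, ih]

-- lookup after a bucketing loop = the bucket's running sum over the matching items
theorem pvGetDFold {γ : Type} (L : List γ) (key val : γ → Int) (d : PySem.Dict Int Int) (k : Int) :
    (L.foldl (fun d x => d.insert (key x) (d.getD (key x) 0 + val x)) d).getD k 0
      = (L.filter (fun x => key x == k)).foldl (fun t x => t + val x) (d.getD k 0) := by
  induction L generalizing d with
  | nil => rfl
  | cons x xs ih =>
      simp only [List.foldl_cons, List.filter_cons]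
      by_cases h : key x = k
      · simp [h, ih]
      · simp [ih, PySem.Dict.getD_insert, h, Ne.symm h]

-- B's dict-building loop splits into two independent loops
theorem pvSplitB (a : List (List Int)) (R : List Int) :
    R.foldl
      (fun (q : PySem.Dict Int Int × PySem.Dict Int Int) j =>
        (PySem.List.enumerate (PySem.List.slice (PySem.List.pyGetD a j []) none (some 5)) 0).foldl
          (fun (q : PySem.Dict Int Int × PySem.Dict Int Int) cv =>
            (q.1.insert (cv.1 - j) (q.1.getD (cv.1 - j) 0 + cv.2),
             q.2.insert (cv.1 + j) (q.2.getD (cv.1 + j) 0 + cv.2))) q)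
      (PySem.Dict.empty, PySem.Dict.empty)
      = (R.foldl (fun d j =>
            (PySem.List.enumerate (PySem.List.slice (PySem.List.pyGetD a j []) none (some 5)) 0).foldl
              (fun d cv => PySem.Dict.insert d (cv.1 - j) (PySem.Dict.getD d (cv.1 - j) 0 + cv.2)) d)
          PySem.Dict.empty,
         R.foldl (fun d j =>
            (PySem.List.enumerate (PySem.List.slice (PySem.List.pyGetD a j []) none (some 5)) 0).foldl
              (fun d cv => PySem.Dict.insert d (cv.1 + j) (PySem.Dict.getD d (cv.1 + j) 0 + cv.2)) d)
          PySem.Dict.empty) :=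
  pvFoldSplit
    (F := fun d j cv => PySem.Dict.insert d (cv.1 - j) (PySem.Dict.getD d (cv.1 - j) 0 + cv.2))
    (G := fun d j cv => PySem.Dict.insert d (cv.1 + j) (PySem.Dict.getD d (cv.1 + j) 0 + cv.2))
    R (fun j => PySem.List.enumerate (PySem.List.slice (PySem.List.pyGetD a j []) none (some 5)) 0) _ _

def pvPairsOf (a : List (List Int)) (R : List Int) : List (Int × (Int × Int)) :=
  R.flatMap (fun j =>
    (PySem.List.enumerate (PySem.List.slice (PySem.List.pyGetD a j []) none (some 5)) 0).map (fun cv => (j, cv)))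

theorem pvFlatM (a : List (List Int)) (R : List Int) :
    R.foldl (fun d j =>
        (PySem.List.enumerate (PySem.List.slice (PySem.List.pyGetD a j []) none (some 5)) 0).foldl
          (fun d cv => PySem.Dict.insert d (cv.1 - j) (PySem.Dict.getD d (cv.1 - j) 0 + cv.2)) d)
      PySem.Dict.empty
      = (pvPairsOf a R).foldl
          (fun d x => PySem.Dict.insert d (x.2.1 - x.1) (PySem.Dict.getD d (x.2.1 - x.1) 0 + x.2.2))
          PySem.Dict.empty :=
  pvFoldFlat
    (f := fun d x => PySem.Dict.insert d (x.2.1 - x.1) (PySem.Dict.getD d (x.2.1 - x.1) 0 + x.2.2))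
    R (fun j => PySem.List.enumerate (PySem.List.slice (PySem.List.pyGetD a j []) none (some 5)) 0) _

theorem pvFlatA (a : List (List Int)) (R : List Int) :
    R.foldl (fun d j =>
        (PySem.List.enumerate (PySem.List.slice (PySem.List.pyGetD a j []) none (some 5)) 0).foldl
          (fun d cv => PySem.Dict.insert d (cv.1 + j) (PySem.Dict.getD d (cv.1 + j) 0 + cv.2)) d)
      PySem.Dict.empty
      = (pvPairsOf a R).foldl
          (fun d x => PySem.Dict.insert d (x.2.1 + x.1) (PySem.Dict.getD d (x.2.1 + x.1) 0 + x.2.2))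
          PySem.Dict.empty :=
  pvFoldFlat
    (f := fun d x => PySem.Dict.insert d (x.2.1 + x.1) (PySem.Dict.getD d (x.2.1 + x.1) 0 + x.2.2))
    R (fun j => PySem.List.enumerate (PySem.List.slice (PySem.List.pyGetD a j []) none (some 5)) 0) _

theorem pvMainLookup (L : List (Int × (Int × Int))) (k : Int) :
    (L.foldl (fun d x => PySem.Dict.insert d (x.2.1 - x.1) (PySem.Dict.getD d (x.2.1 - x.1) 0 + x.2.2))
        PySem.Dict.empty).getD k 0
      = (L.filter (fun x => x.2.1 - x.1 == k)).foldl (fun t x => t + x.2.2) 0 := by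
  simpa using pvGetDFold L (fun x => x.2.1 - x.1) (fun x => x.2.2) PySem.Dict.empty k

theorem pvAntiLookup (L : List (Int × (Int × Int))) (k : Int) :
    (L.foldl (fun d x => PySem.Dict.insert d (x.2.1 + x.1) (PySem.Dict.getD d (x.2.1 + x.1) 0 + x.2.2))
        PySem.Dict.empty).getD k 0
      = (L.filter (fun x => x.2.1 + x.1 == k)).foldl (fun t x => t + x.2.2) 0 := by
  simpa using pvGetDFold L (fun x => x.2.1 + x.1) (fun x => x.2.2) PySem.Dict.empty k

-- B's port evaluates to the common diagonal-sum form
theorem pvAltEval (r0 r1 r2 r3 r4 : List Int) (rest : List (List Int)) :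
    v_diagonal_alt (r0 :: r1 :: r2 :: r3 :: r4 :: rest) = pvOut r0 r1 r2 r3 r4 := by
  simp only [v_diagonal_alt,
    show (PySem.List.pyRange 0 5 1) = [0,1,2,3,4] from rfl]
  simp only [pvSplitB]
  simp only [pvFlatM, pvFlatA]
  simp only [pvMainLookup, pvAntiLookup]
  simp only [pvPairsOf, List.flatMap_cons, List.flatMap_nil, List.append_nil]
  simp only [PySem.List.pyGetD_ofNat', List.getD,
    List.getElem?_cons_zero, List.getElem?_cons_succ, Option.getD_some]
  simp only [List.filter_append, List.filter_map, List.foldl_append, List.foldl_map]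
  have hM : ∀ (j : Int) (row : List Int) (k t0 : Int),
      (List.filter ((fun x : Int × Int × Int => x.2.1 - x.1 == k) ∘ fun cv => (j, cv))
          (PySem.List.enumerate (PySem.List.slice row none (some 5)))).foldl (fun x y => x + y.2) t0
        = pvB row (k + j) t0 := by
    intro j row k t0
    refine pvRowBlock row _ (k + j) t0 ?_
    intro cv
    simp only [Function.comp_apply]
    rw [Bool.eq_iff_iff]
    simp only [beq_iff_eq]
    omega
  have hA : ∀ (j : Int) (row : List Int) (k t0 : Int),
      (List.filter ((fun x : Int × Int × Int => x.2.1 + x.1 == k) ∘ fun cv => (j, cv))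
          (PySem.List.enumerate (PySem.List.slice row none (some 5)))).foldl (fun x y => x + y.2) t0
        = pvB row (k - j) t0 := by
    intro j row k t0
    refine pvRowBlock row _ (k - j) t0 ?_
    intro cv
    simp only [Function.comp_apply]
    rw [Bool.eq_iff_iff]
    simp only [beq_iff_eq]
    omega
  simp only [hM, hA]
  simp only [pvOut, pvMainS, pvAntiS]
  rfl

theorem pvAEval (r0 r1 r2 r3 r4 : List Int) (rest : List (List Int)) :
    v_diagonal (r0 :: r1 :: r2 :: r3 :: r4 :: rest) = pvOut r0 r1 r2 r3 r4 := by
  simp only [v_diagonal, pvOut, pvMainS, pvAntiS, pvB, pvCell,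
    show (PySem.List.pyRange 0 5 1) = [0,1,2,3,4] from rfl,
    List.foldl_cons, List.foldl_nil,
    PySem.List.pyGetD_ofNat', List.getD,
    List.getElem?_cons_zero, List.getElem?_cons_succ, Option.getD_some]

-- ===== VERDICT (by name: the statement is the Claim_ definition above) =====
theorem v_diagonal_spec : Claim_equal_v_diagonal := by
  intro a _ hpre
  obtain ⟨hpre, -⟩ := hpre
  rcases a with _ | ⟨r0, _ | ⟨r1, _ | ⟨r2, _ | ⟨r3, _ | ⟨r4, rest⟩⟩⟩⟩⟩ <;>
    simp only [List.length_cons, List.length_nil] at hpre <;> try omega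
  unfold Spec_v_diagonal
  rw [pvAEval, pvAltEval]
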